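-- pv_equiv track=rewrite | github.com/jjohnit/ms_gsp_python | ms_gsp.py | find_min_mis_item
-- ===== SOURCE A (Python) =====
-- def find_min_mis_item(candidate, min_supports):
--     if(len(candidate) == 1):
--         min_mis_item = candidate[0][0]
--         for item in candidate[0]:
--             if min_supports[item] < min_supports[min_mis_item]:
--                 min_mis_item = item
--         return min_mis_item
--     else:
--         min_mis_item = candidate[0][0]
--         for group in candidate:
--             temp_item = find_min_mis_item([group], min_supports)
--             if min_supports[temp_item] < min_supports[min_mis_item]:
--                 min_mis_item = temp_item
--         return min_mis_item
-- ===== SOURCE B (Python) =====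
-- def find_min_mis_item(candidate, min_supports):
--     best = candidate[0][0]
--     best_val = min_supports[best]
--     for group in candidate:
--         for item in group:
--             v = min_supports[item]
--             if v < best_val:
--                 best, best_val = item, v
--     return best
-- ===== Notes on version B (the rewrite author's own statement) =====
-- stated objective: simpler
-- what changed: Replaced A's recursion (wrapping each group in a singleton list and re-calling itself, re-looking up the current best's support at every comparison) by one flat iterative scan over all items that carries the pair (best, best_val).
import Mathlib
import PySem

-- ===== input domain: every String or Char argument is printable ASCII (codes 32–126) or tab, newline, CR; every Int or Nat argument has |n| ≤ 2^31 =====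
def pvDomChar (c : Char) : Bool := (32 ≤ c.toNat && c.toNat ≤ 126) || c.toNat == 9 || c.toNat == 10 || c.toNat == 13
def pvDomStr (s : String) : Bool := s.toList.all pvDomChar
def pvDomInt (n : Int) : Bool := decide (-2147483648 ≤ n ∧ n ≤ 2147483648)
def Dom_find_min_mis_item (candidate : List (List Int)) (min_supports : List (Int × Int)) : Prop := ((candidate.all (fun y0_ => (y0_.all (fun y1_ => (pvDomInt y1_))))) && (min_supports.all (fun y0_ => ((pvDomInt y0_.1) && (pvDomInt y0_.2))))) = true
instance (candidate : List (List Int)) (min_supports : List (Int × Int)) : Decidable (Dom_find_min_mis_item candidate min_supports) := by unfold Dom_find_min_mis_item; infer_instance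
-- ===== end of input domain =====

-- B replaces A's singleton-wrapping recursion by one iterative scan over all items
-- carrying (best, best_val); same return value on every input where A returns (Pre_).


-- ===== PORT A =====
-- min_supports is a Python dict; msGet is its lookup (none = KeyError)
def msGet (ms : List (Int × Int)) (k : Int) : Option Int :=
  PySem.Dict.get? (PySem.Dict.mk ms) k

-- the 'for item in candidate[0]' loop of A's len==1 branch
def fmm_base (ms : List (Int × Int)) : List Int → Int → Option Int
  | [], best => some best
  | item :: rest, best =>
    match msGet ms item, msGet ms best with
    | some vi, some vb => fmm_base ms rest (if vi < vb then item else best)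
    | _, _ => none

-- A's len(candidate)==1 branch
def fmm_single (candidate : List (List Int)) (ms : List (Int × Int)) : Option Int :=
  match PySem.List.pyGet? candidate 0 with
  | none => none
  | some g0 =>
    match PySem.List.pyGet? g0 0 with
    | none => none
    | some init => fmm_base ms g0 init

-- the 'for group in candidate' loop of A's else branch; the Python recursive call
-- find_min_mis_item([group], ms) always enters the len==1 branch (len([group])==1),
-- so it is ported as fmm_single [g] ms
def fmm_outer (ms : List (Int × Int)) : List (List Int) → Int → Option Int
  | [], best => some best
  | g :: rest, best =>
    match fmm_single [g] ms with
    | none => none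
    | some temp =>
      match msGet ms temp, msGet ms best with
      | some vt, some vb => fmm_outer ms rest (if vt < vb then temp else best)
      | _, _ => none

def find_min_mis_item (candidate : List (List Int)) (min_supports : List (Int × Int)) : Int :=
  (if candidate.length == 1 then fmm_single candidate min_supports
   else
     match PySem.List.pyGet? candidate 0 with
     | none => none
     | some g0 =>
       match PySem.List.pyGet? g0 0 with
       | none => none
       | some init => fmm_outer min_supports candidate init).getD 0

-- ===== PORT B =====
-- B's inner 'for item in group' loop, carrying (best, best_val)
def altInner (ms : List (Int × Int)) : List Int → Int × Int → Option (Int × Int)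
  | [], acc => some acc
  | item :: rest, acc =>
    match msGet ms item with
    | none => none
    | some v => altInner ms rest (if v < acc.2 then (item, v) else acc)

-- B's outer 'for group in candidate' loop
def altOuter (ms : List (Int × Int)) : List (List Int) → Int × Int → Option (Int × Int)
  | [], acc => some acc
  | g :: rest, acc =>
    match altInner ms g acc with
    | none => none
    | some acc' => altOuter ms rest acc'

def find_min_mis_item_alt (candidate : List (List Int)) (min_supports : List (Int × Int)) : Int :=
  (match PySem.List.pyGet? candidate 0 with
   | none => none
   | some g0 =>
     match PySem.List.pyGet? g0 0 with
     | none => none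
     | some b0 =>
       match msGet min_supports b0 with
       | none => none
       | some v0 =>
         match altOuter min_supports candidate (b0, v0) with
         | none => none
         | some acc => some acc.1).getD 0

-- ===== PRECONDITION & SPEC =====
-- Pre_: the inputs on which the Python A returns normally: candidate nonempty (else
-- candidate[0] raises IndexError), every group nonempty (else the recursive call's
-- candidate[0][0] raises IndexError), and every item a key of min_supports (else KeyError).
def Pre_find_min_mis_item (candidate : List (List Int)) (min_supports : List (Int × Int)) : Prop :=
  candidate ≠ [] ∧ ∀ g ∈ candidate, g ≠ [] ∧ ∀ i ∈ g, (PySem.Dict.get? (PySem.Dict.mk min_supports) i).isSome = true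
instance (candidate : List (List Int)) (min_supports : List (Int × Int)) : Decidable (Pre_find_min_mis_item candidate min_supports) := by unfold Pre_find_min_mis_item; infer_instance

def pvWitness_find_min_mis_item : List (List Int) × (List (Int × Int)) := ([[0, 1], [2]], [(0, 5), (1, 3), (2, 4)])

def Spec_find_min_mis_item (candidate : List (List Int)) (min_supports : List (Int × Int)) (out : Int) : Prop := out = find_min_mis_item_alt candidate min_supports
instance (candidate : List (List Int)) (min_supports : List (Int × Int)) (out : Int) : Decidable (Spec_find_min_mis_item candidate min_supports out) := by unfold Spec_find_min_mis_item; infer_instance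

-- ===== CLAIM (what is proved, stated in full; the proofs are below) =====
def Claim_equal_find_min_mis_item : Prop := ∀ (candidate : List (List Int)) (min_supports : List (Int × Int)), Dom_find_min_mis_item candidate min_supports → Pre_find_min_mis_item candidate min_supports → Spec_find_min_mis_item candidate min_supports (find_min_mis_item candidate min_supports)

-- ===== LEMMAS AND PROOFS =====

-- left-biased strict min on the support value
def pvStep (a c : Int × Int) : Int × Int := if c.2 < a.2 then c else a
def pvF (ms : List (Int × Int)) (a : Int × Int) (i : Int) : Int × Int :=
  pvStep a (i, (msGet ms i).getD 0)

theorem pvStep_assoc (a b c : Int × Int) : pvStep (pvStep a b) c = pvStep a (pvStep b c) := by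
  simp only [pvStep]; split_ifs <;> first | rfl | (exfalso; omega)

theorem pvStep_self (a : Int × Int) : pvStep a a = a := by
  simp [pvStep]

theorem pvFoldl_shift (ms : List (Int × Int)) (t : List Int) (a b : Int × Int) :
    t.foldl (pvF ms) (pvStep a b) = pvStep a (t.foldl (pvF ms) b) := by
  induction t generalizing b with
  | nil => rfl
  | cons i t ih =>
    simp only [List.foldl_cons, pvF, pvStep_assoc]
    exact ih _

theorem pvBase_eq (ms : List (Int × Int)) (g : List Int) (b vb : Int)
    (hk : ∀ i ∈ g, (msGet ms i).isSome = true) (hb : msGet ms b = some vb) :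
    fmm_base ms g b = some (g.foldl (pvF ms) (b, vb)).1 := by
  induction g generalizing b vb with
  | nil => simp [fmm_base]
  | cons i t ih =>
    obtain ⟨vi, hvi⟩ := Option.isSome_iff_exists.mp (hk i (by simp))
    simp only [fmm_base, hvi, hb, List.foldl_cons, pvF, pvStep]
    by_cases h : vi < vb
    · simp only [h, Option.getD_some]
      exact ih _ _ (fun j hj => hk j (by simp [hj])) hvi
    · simp only [h, Option.getD_some]
      exact ih _ _ (fun j hj => hk j (by simp [hj])) hb

theorem pvInner_eq (ms : List (Int × Int)) (g : List Int) (b vb : Int)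
    (hk : ∀ i ∈ g, (msGet ms i).isSome = true) :
    altInner ms g (b, vb) = some (g.foldl (pvF ms) (b, vb)) := by
  induction g generalizing b vb with
  | nil => simp [altInner]
  | cons i t ih =>
    obtain ⟨vi, hvi⟩ := Option.isSome_iff_exists.mp (hk i (by simp))
    simp only [altInner, List.foldl_cons, pvF, pvStep, hvi, Option.getD_some]
    by_cases h : vi < vb
    · simp only [h]
      exact ih _ _ (fun j hj => hk j (by simp [hj]))
    · simp only [h]
      exact ih _ _ (fun j hj => hk j (by simp [hj]))

theorem pvSnd_eq (ms : List (Int × Int)) (g : List Int) (a : Int × Int)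
    (hk : ∀ i ∈ g, (msGet ms i).isSome = true) (ha : msGet ms a.1 = some a.2) :
    msGet ms (g.foldl (pvF ms) a).1 = some (g.foldl (pvF ms) a).2 := by
  induction g generalizing a with
  | nil => exact ha
  | cons i t ih =>
    obtain ⟨vi, hvi⟩ := Option.isSome_iff_exists.mp (hk i (by simp))
    simp only [List.foldl_cons, pvF, pvStep, hvi, Option.getD_some]
    by_cases h : vi < a.2
    · simp only [if_pos h]
      exact ih _ (fun j hj => hk j (by simp [hj])) hvi
    · simp only [if_neg h]
      exact ih _ (fun j hj => hk j (by simp [hj])) ha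

-- g nonempty with all keys: A's per-group recursive call computes the strict-first-wins
-- minimum of g started at g's own head, and folding g from (b, vb) is one pvStep away
theorem pvGroup_fold (ms : List (Int × Int)) (h : Int) (t : List Int) (b vb : Int) :
    (h :: t).foldl (pvF ms) (b, vb)
      = pvStep (b, vb) ((h :: t).foldl (pvF ms) (h, (msGet ms h).getD 0)) := by
  simp only [List.foldl_cons, pvF, pvStep_self]
  exact pvFoldl_shift ms t (b, vb) (h, (msGet ms h).getD 0)

theorem pvOuter_eq (ms : List (Int × Int)) (gs : List (List Int)) (b vb : Int)
    (hk : ∀ g ∈ gs, g ≠ [] ∧ ∀ i ∈ g, (msGet ms i).isSome = true)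
    (hb : msGet ms b = some vb) :
    fmm_outer ms gs b = some ((gs.foldl (fun a g => g.foldl (pvF ms) a) (b, vb)).1) ∧
    altOuter ms gs (b, vb) = some (gs.foldl (fun a g => g.foldl (pvF ms) a) (b, vb)) := by
  induction gs generalizing b vb with
  | nil => simp [fmm_outer, altOuter]
  | cons g rest ih =>
    obtain ⟨hgne, hgk⟩ := hk g (by simp)
    obtain ⟨h, t, rfl⟩ : ∃ x xs, g = x :: xs := by
      cases g with | nil => exact absurd rfl hgne | cons x xs => exact ⟨x, xs, rfl⟩
    obtain ⟨vh, hvh⟩ := Option.isSome_iff_exists.mp (hgk h (by simp))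
    have hrest : ∀ g' ∈ rest, g' ≠ [] ∧ ∀ i ∈ g', (msGet ms i).isSome = true :=
      fun g' hg' => hk g' (by simp [hg'])
    -- the group's own fold, started at its head
    set rp := (h :: t).foldl (pvF ms) (h, vh) with hrp
    have hbase : fmm_base ms (h :: t) h = some rp.1 := pvBase_eq ms (h :: t) h vh hgk hvh
    have hsnd : msGet ms rp.1 = some rp.2 := pvSnd_eq ms (h :: t) (h, vh) hgk hvh
    have hfold : (h :: t).foldl (pvF ms) (b, vb) = pvStep (b, vb) rp := by
      rw [pvGroup_fold ms h t b vb, hrp, hvh]; rfl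
    constructor
    · -- A side
      simp only [fmm_outer, fmm_single, PySem.List.pyGet?_zero_cons, hbase, hsnd, hb]
      have : (if rp.2 < vb then rp.1 else b) = (pvStep (b, vb) rp).1 := by
        simp only [pvStep]; split_ifs <;> rfl
      rw [this]
      have hb' : msGet ms (pvStep (b, vb) rp).1 = some (pvStep (b, vb) rp).2 := by
        simp only [pvStep]; split_ifs
        · exact hsnd
        · exact hb
      have := (ih (pvStep (b, vb) rp).1 (pvStep (b, vb) rp).2 hrest hb').1
      simp only [List.foldl_cons, ← hfold] at this ⊢
      rw [this]
    · -- B side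
      simp only [altOuter, pvInner_eq ms (h :: t) b vb hgk]
      have hb' : msGet ms ((h :: t).foldl (pvF ms) (b, vb)).1
          = some ((h :: t).foldl (pvF ms) (b, vb)).2 := pvSnd_eq ms (h :: t) (b, vb) hgk hb
      have := (ih _ _ hrest hb').2
      simpa [List.foldl_cons] using this

-- ===== VERDICT (by name: the statement is the Claim_ definition above) =====
theorem find_min_mis_item_spec : Claim_equal_find_min_mis_item := by
  intro cand ms _ hpre
  obtain ⟨hne, hk⟩ := hpre
  obtain ⟨g0, rest, rfl⟩ : ∃ x xs, cand = x :: xs := by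
    cases cand with | nil => exact absurd rfl hne | cons x xs => exact ⟨x, xs, rfl⟩
  obtain ⟨hg0ne, hg0k⟩ := hk g0 (by simp)
  obtain ⟨h, t, rfl⟩ : ∃ x xs, g0 = x :: xs := by
    cases g0 with | nil => exact absurd rfl hg0ne | cons x xs => exact ⟨x, xs, rfl⟩
  obtain ⟨vh, hvh0⟩ := Option.isSome_iff_exists.mp (hg0k h (by simp))
  have hvh : msGet ms h = some vh := hvh0
  have hk' : ∀ g ∈ (h :: t) :: rest, g ≠ [] ∧ ∀ i ∈ g, (msGet ms i).isSome = true := by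
    intro g hg
    obtain ⟨h1, h2⟩ := hk g hg
    exact ⟨h1, fun i hi => h2 i hi⟩
  have houter := pvOuter_eq ms ((h :: t) :: rest) h vh hk' hvh
  show find_min_mis_item _ _ = find_min_mis_item_alt _ _
  -- B's value
  have hBval : find_min_mis_item_alt ((h :: t) :: rest) ms
      = (((h :: t) :: rest).foldl (fun a g => g.foldl (pvF ms) a) (h, vh)).1 := by
    simp only [find_min_mis_item_alt, PySem.List.pyGet?_zero_cons, hvh, houter.2,
      Option.getD_some]
  rw [hBval]
  by_cases hlen : ((h :: t) :: rest).length == 1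
  · -- rest = []
    have hrest : rest = [] := by
      cases rest with
      | nil => rfl
      | cons a b => simp at hlen
    subst hrest
    simp only [find_min_mis_item, hlen, if_true, fmm_single, PySem.List.pyGet?_zero_cons,
      pvBase_eq ms (h :: t) h vh (fun i hi => hg0k i hi) hvh, Option.getD_some, List.foldl_cons,
      List.foldl_nil]
  · simp only [find_min_mis_item, hlen, Bool.false_eq_true, if_false,
      PySem.List.pyGet?_zero_cons, houter.1, Option.getD_some]
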